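-- pv_equiv track=rewrite | github.com/takky-takky14/zine-imposer | app.py | build_booklet_pairs
-- ===== SOURCE A (Python) =====
-- from typing import List, Tuple, Optional
--
-- def build_booklet_pairs(page_count: int) -> List[Tuple[int, int]]:
--     """
--     中綴じ面付け用のページペアを返す。
--     12ページなら:
--     [(11,0), (1,10), (9,2), (3,8), (7,4), (5,6)]
--     """
--     pairs: List[Tuple[int, int]] = []
--     left = page_count
--     right = 1
--
--     while left > right:
--         # 表面
--         pairs.append((left - 1, right - 1))
--         left -= 1
--         right += 1
--
--         # 裏面
--         pairs.append((right - 1, left - 1))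
--         left -= 1
--         right += 1
--
--     return pairs
-- ===== SOURCE B (Python) =====
-- from typing import List, Tuple
--
-- def build_booklet_pairs(page_count: int) -> List[Tuple[int, int]]:
--     sheets = max(0, (page_count + 2) // 4)
--     return [pair
--             for j in range(sheets)
--             for pair in ((page_count - 2 * j - 1, 2 * j),
--                          (2 * j + 1, page_count - 2 * j - 2))]
-- ===== Notes on version B (the rewrite author's own statement) =====
-- stated objective: alternative
-- what changed: Replaces the stateful while-loop with mutable left/right pointers by computing the sheet count max(0,(page_count+2)//4) up front and emitting both pairs of each sheet by direct index formula in a comprehension.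
import Mathlib
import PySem

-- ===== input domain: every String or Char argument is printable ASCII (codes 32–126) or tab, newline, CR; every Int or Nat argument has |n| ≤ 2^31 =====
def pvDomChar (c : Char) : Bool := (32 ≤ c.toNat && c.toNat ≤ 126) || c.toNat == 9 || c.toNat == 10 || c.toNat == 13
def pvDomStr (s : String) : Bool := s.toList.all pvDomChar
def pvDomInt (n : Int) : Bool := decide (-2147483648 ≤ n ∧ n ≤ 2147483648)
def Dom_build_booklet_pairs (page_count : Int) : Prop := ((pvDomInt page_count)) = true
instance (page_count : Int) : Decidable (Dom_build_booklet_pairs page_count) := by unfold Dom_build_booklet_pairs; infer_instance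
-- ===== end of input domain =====

-- B replaces A's mutable left/right pointer loop by an up-front sheet count and a direct per-sheet formula (objective: alternative decomposition, same cost).

-- ===== PORT A =====
-- A's while-loop: state (pairs, left, right); each iteration appends the front and back pair and
-- moves both pointers twice.  The growing 'pairs' list is kept reversed (cons instead of append,
-- one final reverse), the standard encoding of Python's O(1) list.append in an accumulator.
def bbpLoop (pairs : List (Int × Int)) (left right : Int) : List (Int × Int) :=
  if left > right then
    bbpLoop ((right, left - 2) :: (left - 1, right - 1) :: pairs) (left - 2) (right + 2)
  else pairs
termination_by (left - right).toNat
decreasing_by omega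

def build_booklet_pairs (page_count : Int) : List (Int × Int) :=
  (bbpLoop [] page_count 1).reverse

-- ===== PORT B =====
def build_booklet_pairs_alt (page_count : Int) : List (Int × Int) :=
  let sheets := max 0 (PySem.Int.floordiv (page_count + 2) 4)
  (PySem.List.pyRange 0 sheets 1).flatMap
    (fun j => [(page_count - 2 * j - 1, 2 * j), (2 * j + 1, page_count - 2 * j - 2)])

-- ===== PRECONDITION & SPEC =====
def Spec_build_booklet_pairs (page_count : Int) (out : List (Int × Int)) : Prop := out = build_booklet_pairs_alt page_count
instance (page_count : Int) (out : List (Int × Int)) : Decidable (Spec_build_booklet_pairs page_count out) := by unfold Spec_build_booklet_pairs; infer_instance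

-- ===== CLAIM (what is proved, stated in full; the proofs are below) =====
def Claim_equal_build_booklet_pairs : Prop := ∀ (page_count : Int), Dom_build_booklet_pairs page_count → Spec_build_booklet_pairs page_count (build_booklet_pairs page_count)

-- ===== LEMMAS AND PROOFS =====

-- Loop invariant: at sheet index j the pointers are left = pc - 2j, right = 1 + 2j, and the
-- remaining output is the flatMap over sheets j, j+1, …, sheets-1.
theorem bbpLoop_eq (pc : Int) : ∀ (j : Int) (pairs : List (Int × Int)), 0 ≤ j →
    bbpLoop pairs (pc - 2 * j) (1 + 2 * j) =
      ((PySem.List.pyRange j (max 0 (PySem.Int.floordiv (pc + 2) 4)) 1).flatMap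
        (fun j => [(pc - 2 * j - 1, 2 * j), (2 * j + 1, pc - 2 * j - 2)])).reverse ++ pairs := by
  intro j pairs hj
  by_cases h : pc - 2 * j > 1 + 2 * j
  · have hJ : j < max 0 (PySem.Int.floordiv (pc + 2) 4) := by
      have h4 : (j + 1) * 4 ≤ pc + 2 := by omega
      have := (PySem.Int.le_floordiv_iff_mul_le (show (0:Int) < 4 by norm_num)).mpr h4
      omega
    rw [bbpLoop, if_pos h, PySem.List.pyRange_one_cons hJ]
    have step := bbpLoop_eq pc (j + 1) ((2 * j + 1, pc - 2 * j - 2) :: (pc - 2 * j - 1, 2 * j) :: pairs) (by omega)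
    have hL : bbpLoop ((1 + 2 * j, pc - 2 * j - 2) :: (pc - 2 * j - 1, 1 + 2 * j - 1) :: pairs) (pc - 2 * j - 2) (1 + 2 * j + 2)
        = bbpLoop ((2 * j + 1, pc - 2 * j - 2) :: (pc - 2 * j - 1, 2 * j) :: pairs) (pc - 2 * (j + 1)) (1 + 2 * (j + 1)) := by
      have a1 : (1 : Int) + 2 * j - 1 = 2 * j := by ring
      have a4 : (1 : Int) + 2 * j + 2 = 1 + 2 * (j + 1) := by ring
      have a2 : (1 : Int) + 2 * j = 2 * j + 1 := by ring
      have a3 : pc - 2 * j - 2 = pc - 2 * (j + 1) := by ring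
      rw [a1, a4, a2, a3]
    rw [hL, step]
    simp [List.append_assoc]
  · have hJ : max 0 (PySem.Int.floordiv (pc + 2) 4) ≤ j := by
      have h4 : pc + 2 < (j + 1) * 4 := by omega
      have := (PySem.Int.floordiv_lt_iff_lt_mul (show (0:Int) < 4 by norm_num)).mpr h4
      omega
    rw [bbpLoop, if_neg h, PySem.List.pyRange_one_eq_nil hJ]
    simp
termination_by j => (pc - 4 * j - 1).toNat
decreasing_by omega

-- ===== VERDICT (by name: the statement is the Claim_ definition above) =====
theorem build_booklet_pairs_spec : Claim_equal_build_booklet_pairs := by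
  intro pc _
  unfold Spec_build_booklet_pairs build_booklet_pairs build_booklet_pairs_alt
  have := bbpLoop_eq pc 0 [] le_rfl
  simp only [mul_zero, sub_zero, add_zero] at this
  rw [this]
  simp
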